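-- pv_equiv track=rewrite | github.com/ssoms001/AI-Based-Indian-Sign-Language-ISL-Recognition | src/utils/nlp_processor.py | _filter_gestures
-- ===== SOURCE A (Python) =====
-- from typing import List, Dict, Optional, Tuple
--
-- def _filter_gestures(gestures: List[str]) -> List[str]:
--     """
--     Filter gestures to remove noise and duplicates
--
--     Args:
--         gestures: Raw gesture list
--
--     Returns:
--         Filtered gesture list
--     """
--     if not gestures:
--         return []
--
--     filtered = []
--     last_gesture = None
--
--     for gesture in gestures:
--         # Clean and validate gesture
--         clean_gesture = gesture.strip().upper()
--         if (clean_gesture and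
--             clean_gesture.isalpha() and
--             len(clean_gesture) == 1 and
--             clean_gesture != last_gesture):
--             filtered.append(clean_gesture)
--             last_gesture = clean_gesture
--
--     return filtered
-- ===== SOURCE B (Python) =====
-- def _filter_gestures(gestures):
--     """Two-pass: collect cleaned valid single letters, then drop consecutive duplicates."""
--     valid = [c for g in gestures if (c := g.strip().upper()).isalpha() and len(c) == 1]
--     return [c for c, prev in zip(valid, [None, *valid]) if c != prev]
-- ===== Notes on version B (the rewrite author's own statement) =====
-- stated objective: idiomatic
-- what changed: Replaces the single interleaved loop with explicit last-gesture state by two passes: a comprehension that cleans and validates, then a zip-with-predecessor pass that drops consecutive duplicates.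
import Mathlib
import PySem

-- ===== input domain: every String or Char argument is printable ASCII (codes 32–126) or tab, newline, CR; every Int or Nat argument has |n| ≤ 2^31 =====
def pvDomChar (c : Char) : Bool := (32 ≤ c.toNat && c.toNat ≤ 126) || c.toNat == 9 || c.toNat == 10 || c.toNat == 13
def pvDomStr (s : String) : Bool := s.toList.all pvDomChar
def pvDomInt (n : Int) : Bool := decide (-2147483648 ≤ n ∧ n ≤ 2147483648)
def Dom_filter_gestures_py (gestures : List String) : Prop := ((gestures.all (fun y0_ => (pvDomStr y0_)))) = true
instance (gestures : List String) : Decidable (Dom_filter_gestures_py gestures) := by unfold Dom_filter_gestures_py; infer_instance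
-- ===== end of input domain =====

-- B replaces A's single loop with last-gesture state by two passes (clean/validate, then drop
-- consecutive duplicates by comparing each element with its predecessor); same cost, more idiomatic.

-- ===== PORT A =====
def pvStepA (st : List String × Option String) (gesture : String) : List String × Option String :=
  let clean := PySem.Str.upper (PySem.Str.strip gesture)
  if (PySem.Str.len clean != 0) && PySem.Str.strIsalpha clean
      && (PySem.Str.len clean == 1) && (st.2 != some clean)
  then (st.1 ++ [clean], some clean)
  else st

def filter_gestures_py (gestures : List String) : List String :=
  if gestures = [] then []
  else (gestures.foldl pvStepA ([], none)).1

-- ===== PORT B =====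
-- [c for g in gestures if (c := g.strip().upper()).isalpha() and len(c) == 1]
def pvClean? (g : String) : Option String :=
  let c := PySem.Str.upper (PySem.Str.strip g)
  if PySem.Str.strIsalpha c && (PySem.Str.len c == 1) then some c else none

def filter_gestures_py_alt (gestures : List String) : List String :=
  let valid := gestures.filterMap pvClean?
  -- [c for c, prev in zip(valid, [None, *valid]) if c != prev]
  (valid.zip (none :: valid.map some)).filterMap
    (fun p => if p.2 != some p.1 then some p.1 else none)

-- ===== PRECONDITION & SPEC =====
def Spec_filter_gestures_py (gestures : List String) (out : List String) : Prop := out = filter_gestures_py_alt gestures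
instance (gestures : List String) (out : List String) : Decidable (Spec_filter_gestures_py gestures out) := by unfold Spec_filter_gestures_py; infer_instance

-- ===== CLAIM (what is proved, stated in full; the proofs are below) =====
def Claim_equal_filter_gestures_py : Prop := ∀ (gestures : List String), Dom_filter_gestures_py gestures → Spec_filter_gestures_py gestures (filter_gestures_py gestures)

-- ===== LEMMAS AND PROOFS =====

-- B's second pass, parameterised by the predecessor of the first element
def pvZipD (v : List String) (p : Option String) : List String :=
  (v.zip (p :: v.map some)).filterMap
    (fun q => if q.2 != some q.1 then some q.1 else none)

theorem pvZipD_cons (c : String) (cs : List String) (p : Option String) :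
    pvZipD (c :: cs) p =
      if p ≠ some c then c :: pvZipD cs (some c) else pvZipD cs (some c) := by
  simp only [pvZipD, List.map_cons, List.zip_cons_cons, List.filterMap_cons, bne_iff_ne, ne_eq]
  split_ifs <;> simp_all

-- the nonemptiness conjunct of A's guard is implied by len = 1
theorem pvCond_eq (c : String) (last : Option String) :
    ((PySem.Str.len c != 0) && PySem.Str.strIsalpha c
      && (PySem.Str.len c == 1) && (last != some c))
    = (PySem.Str.strIsalpha c && (PySem.Str.len c == 1) && (last != some c)) := by
  by_cases h : PySem.Str.len c = 1
  · rw [h]; cases PySem.Str.strIsalpha c <;> simp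
  · have h1 : (PySem.Str.len c == 1) = false := by simpa using h
    rw [h1]; cases (PySem.Str.len c != 0) <;> cases PySem.Str.strIsalpha c <;> simp

theorem pvStepA_eq (acc : List String) (last : Option String) (g : String) :
    pvStepA (acc, last) g =
      match pvClean? g with
      | none => (acc, last)
      | some c => if last ≠ some c then (acc ++ [c], some c) else (acc, last) := by
  unfold pvStepA pvClean?
  simp only [pvCond_eq]
  cases hv : (PySem.Str.strIsalpha (PySem.Str.upper (PySem.Str.strip g))
      && (PySem.Str.len (PySem.Str.upper (PySem.Str.strip g)) == 1)) with
  | false => simp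
  | true =>
    simp only [Bool.true_and]
    by_cases hl : last = some (PySem.Str.upper (PySem.Str.strip g)) <;> simp [hl]

theorem pv_foldA_eq (gs : List String) (acc : List String) (last : Option String) :
    (gs.foldl pvStepA (acc, last)).1 = acc ++ pvZipD (gs.filterMap pvClean?) last := by
  induction gs generalizing acc last with
  | nil => simp [pvZipD]
  | cons g gs ih =>
    rw [List.foldl_cons, List.filterMap_cons]
    cases hcg : pvClean? g with
    | none => rw [pvStepA_eq]; simp only [hcg]; exact ih acc last
    | some c =>
      rw [pvStepA_eq]; simp only [hcg, pvZipD_cons]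
      by_cases hl : last = some c
      · subst hl
        simp only [ne_eq, not_true_eq_false, if_false]
        exact ih acc (some c)
      · simp only [if_pos hl, ih, List.append_assoc, List.singleton_append]

theorem pv_alt_eq (gs : List String) :
    filter_gestures_py_alt gs = pvZipD (gs.filterMap pvClean?) none := rfl

-- ===== VERDICT (by name: the statement is the Claim_ definition above) =====
theorem filter_gestures_py_spec : Claim_equal_filter_gestures_py := by
  intro gs _
  unfold Spec_filter_gestures_py
  rw [pv_alt_eq]
  unfold filter_gestures_py
  split_ifs with h
  · simp [h, pvZipD]
  · rw [pv_foldA_eq]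
    simp
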